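-- pv_equiv track=rewrite | github.com/Karthikeya-ctrl/BioLab2 | LeaderBoard.py | trim_leaderboard
-- ===== SOURCE A (Python) =====
-- import collections
--
-- def get_linear_spectrum(peptide):
--     n = len(peptide)
--     spectrum = [0]
--     for length in range(1, n + 1):
--         for i in range(n - length + 1):
--             spectrum.append(sum(peptide[i:i + length]))
--     return sorted(spectrum)
--
-- def get_score(peptide, experimental_spectrum):
--     theoretical = get_linear_spectrum(peptide)
--     theo_counts = collections.Counter(theoretical)
--     exp_counts = collections.Counter(experimental_spectrum)
--
--     score = 0
--     for mass in theo_counts: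
--         score += min(theo_counts[mass], exp_counts.get(mass, 0))
--     return score
--
-- def trim_leaderboard(leaderboard, spectrum, n):
--     if not leaderboard:
--         return []
--
--     scores = [(get_score(p, spectrum), p) for p in leaderboard]
--     scores.sort(key=lambda x: x[0], reverse=True)
--
--     trimmed = [scores[i][1] for i in range(min(len(scores), n))]
--
--     if len(scores) > n:
--         threshold = scores[n - 1][0]
--         for i in range(n, len(scores)):
--             if scores[i][0] == threshold:
--                 trimmed.append(scores[i][1])
--             else:
--                 break
--     return trimmed
-- ===== SOURCE B (Python) =====
-- def linear_spectrum_masses(peptide):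
--     # all contiguous-subpeptide masses via prefix sums (no re-summing of slices)
--     prefix = [0]
--     for x in peptide:
--         prefix.append(prefix[-1] + x)
--     m = len(peptide)
--     masses = [0]
--     for length in range(1, m + 1):
--         for i in range(m - length + 1):
--             masses.append(prefix[i + length] - prefix[i])
--     return masses
--
--
-- def score_peptide(peptide, exp_counts):
--     theo = {}
--     for mass in linear_spectrum_masses(peptide):
--         theo[mass] = theo.get(mass, 0) + 1
--     return sum(min(c, exp_counts.get(mass, 0)) for mass, c in theo.items())
--
--
-- def trim_leaderboard(leaderboard, spectrum, n):
--     exp_counts = {}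
--     for mass in spectrum:
--         exp_counts[mass] = exp_counts.get(mass, 0) + 1
--     scored = sorted(((score_peptide(p, exp_counts), p) for p in leaderboard),
--                     key=lambda x: x[0], reverse=True)
--     out = []
--     threshold = None
--     for s, p in scored:
--         if len(out) >= n and s != threshold:
--             break
--         out.append(p)
--         threshold = s
--     return out
-- ===== Notes on version B (the rewrite author's own statement) =====
-- stated objective: faster
-- what changed: B computes each linear-spectrum mass as a difference of two prefix sums instead of re-summing every slice, hoists and builds the experimental counts dict once (A rebuilds Counter(spectrum) per peptide), and trims with a single threshold-tracking scan over the sorted pairs instead of index arithmetic with a tie loop.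
-- outside the precondition, e.g. on trim_leaderboard([[1], [1]], [], 0): A returns [[1], [1]], B returns []; on trim_leaderboard([[1], [1]], [], -1): A returns [[1], [1], [1]], B returns []
import Mathlib
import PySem

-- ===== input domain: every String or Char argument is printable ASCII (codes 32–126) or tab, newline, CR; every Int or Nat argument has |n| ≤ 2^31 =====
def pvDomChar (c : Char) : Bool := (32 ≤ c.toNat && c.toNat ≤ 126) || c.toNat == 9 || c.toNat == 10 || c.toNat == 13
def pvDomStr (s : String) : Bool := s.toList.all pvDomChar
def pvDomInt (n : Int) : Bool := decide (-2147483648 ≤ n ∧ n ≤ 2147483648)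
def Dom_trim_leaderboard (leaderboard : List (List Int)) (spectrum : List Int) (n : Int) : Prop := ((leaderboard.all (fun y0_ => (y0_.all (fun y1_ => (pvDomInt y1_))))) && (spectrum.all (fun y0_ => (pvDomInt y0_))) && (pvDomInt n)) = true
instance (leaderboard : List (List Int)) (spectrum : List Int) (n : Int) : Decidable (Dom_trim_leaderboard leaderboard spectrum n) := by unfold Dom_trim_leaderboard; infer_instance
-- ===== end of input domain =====

-- B replaces A's O(m^3) slice re-summing by prefix-sum differences, builds the experimental
-- count dict once instead of per peptide, and trims with one threshold-tracking scan
-- (objective: faster; equivalence proved on Pre_, i.e. 1 ≤ n or an empty leaderboard).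

-- ===== PORT A =====
def get_linear_spectrum (peptide : List Int) : List Int :=
  let n : Int := peptide.length
  let spectrum := (PySem.List.pyRange 1 (n + 1)).foldl (fun spec len =>
    (PySem.List.pyRange 0 (n - len + 1)).foldl (fun spec i =>
      spec ++ [(PySem.List.slice peptide (some i) (some (i + len))).sum]) spec) [0]
  PySem.List.sorted spectrum (fun x => x)

def get_score (peptide : List Int) (experimental_spectrum : List Int) : Int :=
  let theoretical := get_linear_spectrum peptide
  let theo_counts := PySem.Dict.counter theoretical
  let exp_counts := PySem.Dict.counter experimental_spectrum
  -- 'for mass in theo_counts': iterate the dict's keys in insertion order;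
  -- theo_counts[mass] is in range (mass is a key), ported with getD
  theo_counts.keys.foldl (fun score mass =>
    score + min (theo_counts.getD mass 0) (exp_counts.getD mass 0)) 0

-- 'for i in range(n, len(scores)): if scores[i][0] == threshold: append else break'
def pvTieLoopA (scores : List (Int × List Int)) (threshold : Int) :
    List Int → List (List Int) → List (List Int)
  | [], trimmed => trimmed
  | i :: rest, trimmed =>
    if (PySem.List.pyGetD scores i (0, [])).1 = threshold then
      pvTieLoopA scores threshold rest (trimmed ++ [(PySem.List.pyGetD scores i (0, [])).2])
    else trimmed

def trim_leaderboard (leaderboard : List (List Int)) (spectrum : List Int) (n : Int) : List (List Int) :=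
  if leaderboard = [] then [] else
  let scores := leaderboard.map (fun p => (get_score p spectrum, p))
  let scores := PySem.List.sorted scores (fun x => x.1) true
  let trimmed := (PySem.List.pyRange 0 (min (scores.length : Int) n)).map
    (fun i => (PySem.List.pyGetD scores i (0, [])).2)
  if (scores.length : Int) > n then
    -- scores[n-1]: in range on Pre_ (1 ≤ n < len); out of range Python raises (excluded by Pre_)
    let threshold := (PySem.List.pyGetD scores (n - 1) (0, [])).1
    pvTieLoopA scores threshold (PySem.List.pyRange n (scores.length : Int)) trimmed
  else trimmed

-- ===== PORT B =====
-- prefix = [0]; for x in peptide: prefix.append(prefix[-1] + x)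
def pvPrefixSums (peptide : List Int) : List Int :=
  peptide.foldl (fun pre x => pre ++ [PySem.List.pyGetD pre (-1) 0 + x]) [0]

def linear_spectrum_masses (peptide : List Int) : List Int :=
  let pre := pvPrefixSums peptide
  let m : Int := peptide.length
  (PySem.List.pyRange 1 (m + 1)).foldl (fun masses len =>
    (PySem.List.pyRange 0 (m - len + 1)).foldl (fun masses i =>
      masses ++ [PySem.List.pyGetD pre (i + len) 0 - PySem.List.pyGetD pre i 0]) masses) [0]

def score_peptide (peptide : List Int) (exp_counts : PySem.Dict Int Int) : Int :=
  let theo := (linear_spectrum_masses peptide).foldl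
    (fun d mass => d.insert mass (d.getD mass 0 + 1)) PySem.Dict.empty
  ((theo.items).map (fun p => min p.2 (exp_counts.getD p.1 0))).sum

-- for s, p in scored: if len(out) >= n and s != threshold: break; out.append(p); threshold = s
def pvScanB (n : Int) : List (Int × List Int) → List (List Int) → Option Int → List (List Int)
  | [], out, _ => out
  | (s, p) :: rest, out, threshold =>
    if n ≤ (out.length : Int) ∧ some s ≠ threshold then out
    else pvScanB n rest (out ++ [p]) (some s)

def trim_leaderboard_alt (leaderboard : List (List Int)) (spectrum : List Int) (n : Int) : List (List Int) :=
  let exp_counts := spectrum.foldl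
    (fun d mass => d.insert mass (d.getD mass 0 + 1)) PySem.Dict.empty
  let scored := PySem.List.sorted
    (leaderboard.map (fun p => (score_peptide p exp_counts, p))) (fun x => x.1) true
  pvScanB n scored [] none

-- ===== PRECONDITION & SPEC =====
-- Pre_ excludes n ≤ 0 with a nonempty leaderboard: there A raises IndexError (when
-- n ≤ -len(leaderboard)) or returns a list produced by Python's negative-index wraparound
-- in scores[n-1] and range(n, len) — a corner no caller of a top-n trim specifies; B returns [].
def Pre_trim_leaderboard (leaderboard : List (List Int)) (spectrum : List Int) (n : Int) : Prop :=
  leaderboard = [] ∨ 1 ≤ n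
instance (leaderboard : List (List Int)) (spectrum : List Int) (n : Int) : Decidable (Pre_trim_leaderboard leaderboard spectrum n) := by unfold Pre_trim_leaderboard; infer_instance

def pvWitness_trim_leaderboard : List (List Int) × List Int × Int :=
  ([[1, 2], [3], [1, 2]], [1, 2, 3], 1)

def Spec_trim_leaderboard (leaderboard : List (List Int)) (spectrum : List Int) (n : Int) (out : List (List Int)) : Prop := out = trim_leaderboard_alt leaderboard spectrum n
instance (leaderboard : List (List Int)) (spectrum : List Int) (n : Int) (out : List (List Int)) : Decidable (Spec_trim_leaderboard leaderboard spectrum n out) := by unfold Spec_trim_leaderboard; infer_instance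

-- ===== CLAIM (what is proved, stated in full; the proofs are below) =====
def Claim_equal_trim_leaderboard : Prop := ∀ (leaderboard : List (List Int)) (spectrum : List Int) (n : Int), Dom_trim_leaderboard leaderboard spectrum n → Pre_trim_leaderboard leaderboard spectrum n → Spec_trim_leaderboard leaderboard spectrum n (trim_leaderboard leaderboard spectrum n)


-- ===== LEMMAS AND PROOFS =====

theorem pvGetD_last (xs : List Int) (y : Int) : PySem.List.pyGetD (xs ++ [y]) (-1) 0 = y := by
  simp [PySem.List.pyGetD, PySem.List.pyGet?, PySem.List.pyIdx?]

theorem pvPrefixSums_eq (peptide : List Int) :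
    pvPrefixSums peptide = (List.range (peptide.length + 1)).map (fun k => (peptide.take k).sum) := by
  induction peptide using List.reverseRecOn with
  | nil => simp [pvPrefixSums]
  | append_singleton l x ih =>
    have hfold : pvPrefixSums (l ++ [x]) =
        pvPrefixSums l ++ [PySem.List.pyGetD (pvPrefixSums l) (-1) 0 + x] := by
      simp [pvPrefixSums]
    have hlast : PySem.List.pyGetD (pvPrefixSums l) (-1) 0 = l.sum := by
      rw [ih]
      have : (List.range (l.length + 1)).map (fun k => (l.take k).sum) =
          (List.range l.length).map (fun k => (l.take k).sum) ++ [l.sum] := by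
        rw [List.range_succ]; simp
      rw [this, pvGetD_last]
    rw [hfold, hlast, ih]
    have hlen : (l ++ [x]).length + 1 = (l.length + 1) + 1 := by simp
    rw [hlen, List.range_succ (n := l.length + 1)]
    simp only [List.map_append, List.map_cons, List.map_nil]
    congr 1
    · apply List.map_congr_left
      intro k hk
      simp only [List.mem_range] at hk
      rw [List.take_append_of_le_length (by omega)]
    · simp

theorem pvPrefixSums_getD (peptide : List Int) (j : Nat) (h : j ≤ peptide.length) :
    PySem.List.pyGetD (pvPrefixSums peptide) (j : Int) 0 = (peptide.take j).sum := by
  rw [PySem.List.pyGetD_natCast, pvPrefixSums_eq]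
  rw [List.getD_eq_getElem _ _ (by simp; omega)]
  simp

theorem pvSliceSum (peptide : List Int) (i len : Int) (h0 : 0 ≤ i) (h1 : 0 < len)
    (h2 : i + len ≤ (peptide.length : Int)) :
    PySem.List.pyGetD (pvPrefixSums peptide) (i + len) 0 - PySem.List.pyGetD (pvPrefixSums peptide) i 0
      = (PySem.List.slice peptide (some i) (some (i + len))).sum := by
  obtain ⟨a, rfl⟩ := Int.eq_ofNat_of_zero_le h0
  obtain ⟨c, rfl⟩ := Int.eq_ofNat_of_zero_le (le_of_lt h1)
  have hac : (a : Int) + (c : Int) = ((a + c : Nat) : Int) := by push_cast; ring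
  have hle : a + c ≤ peptide.length := by omega
  rw [PySem.List.slice_toNat _ h0 (by omega)]
  rw [hac, pvPrefixSums_getD _ _ hle, pvPrefixSums_getD _ _ (by omega)]
  simp only [Int.toNat_natCast]
  have hsplit : a + c = a + c := rfl
  rw [show a + c - a = c from by omega, show a + c = a + c from rfl, List.take_add, List.sum_append]
  ring

theorem pvMasses_eq (peptide : List Int) :
    linear_spectrum_masses peptide =
      (PySem.List.pyRange 1 ((peptide.length : Int) + 1)).foldl (fun spec len =>
        (PySem.List.pyRange 0 ((peptide.length : Int) - len + 1)).foldl (fun spec i =>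
          spec ++ [(PySem.List.slice peptide (some i) (some (i + len))).sum]) spec) [0] := by
  unfold linear_spectrum_masses
  simp only [PySem.List.foldl_append_singleton_eq_map, PySem.List.foldl_append_eq_flatMap]
  congr 1
  apply List.flatMap_congr
  intro len hlen
  rw [PySem.List.mem_pyRange_one] at hlen
  apply List.map_congr_left
  intro i hi
  rw [PySem.List.mem_pyRange_one] at hi
  exact pvSliceSum peptide i len hi.1 (by omega) (by omega)

theorem pvScore_eq (peptide : List Int) (spectrum : List Int) :
    get_score peptide spectrum = score_peptide peptide (PySem.Dict.counter spectrum) := by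
  have hmass := pvMasses_eq peptide
  simp only [get_score, score_peptide, get_linear_spectrum, ← hmass]
  set M := linear_spectrum_masses peptide with hM
  rw [PySem.Dict.foldl_insert_getD_add_one_eq_counter]
  rw [PySem.List.foldl_add, PySem.Dict.keys_counter, PySem.Dict.items_counter, List.map_map]
  simp only [PySem.Dict.getD_counter, Function.comp_def]
  have hperm : (PySem.List.sorted M (fun x => x)).Perm M := PySem.List.sorted_perm M _ false
  have hcnt : ∀ k : Int, (PySem.List.sorted M (fun x => x)).count k = M.count k :=
    fun k => hperm.count_eq k
  have hsets : (PySem.Set.ofList (PySem.List.sorted M (fun x => x))).Perm (PySem.Set.ofList M) := by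
    apply (List.perm_ext_iff_of_nodup (PySem.Set.nodup_ofList _) (PySem.Set.nodup_ofList _)).mpr
    intro a
    rw [PySem.Set.mem_ofList, PySem.Set.mem_ofList]
    exact hperm.mem_iff
  rw [zero_add]
  calc ((PySem.Set.ofList (PySem.List.sorted M (fun x => x))).map
          (fun k => min ((PySem.List.sorted M (fun x => x)).count k : Int) (spectrum.count k : Int))).sum
      = ((PySem.Set.ofList (PySem.List.sorted M (fun x => x))).map
          (fun k => min (M.count k : Int) (spectrum.count k : Int))).sum := by
        congr 1
        apply List.map_congr_left
        intro k _
        rw [hcnt]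
    _ = ((PySem.Set.ofList M).map (fun k => min (M.count k : Int) (spectrum.count k : Int))).sum :=
        (hsets.map _).sum_eq

theorem pvRange_nil (a b : Int) (h : b ≤ a) : PySem.List.pyRange a b = [] := by
  simp [PySem.List.pyRange]; omega

theorem pvScanB_tie (n : Int) (L : List (Int × List Int)) :
    ∀ (out : List (List Int)) (s : Int), n ≤ (out.length : Int) →
    pvScanB n L out (some s) = out ++ (L.takeWhile (fun q => q.1 == s)).map Prod.snd := by
  induction L with
  | nil => intro out s h; simp [pvScanB]
  | cons q rest ih =>
    intro out s h
    obtain ⟨s', p'⟩ := q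
    by_cases hs : s' = s
    · subst hs
      rw [show pvScanB n ((s', p') :: rest) out (some s') = pvScanB n rest (out ++ [p']) (some s') by
        simp [pvScanB]]
      rw [ih (out ++ [p']) s' (by simp; omega)]
      simp [List.takeWhile_cons]
    · rw [show pvScanB n ((s', p') :: rest) out (some s) = out by
        simp [pvScanB, h, hs]]
      simp [List.takeWhile_cons, hs]

theorem pvScanB_all (n : Int) (L : List (Int × List Int)) :
    ∀ (out : List (List Int)) (th : Option Int), (out.length : Int) + L.length ≤ n →
    pvScanB n L out th = out ++ L.map Prod.snd := by
  induction L with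
  | nil => intro out th h; simp [pvScanB]
  | cons q rest ih =>
    intro out th h
    obtain ⟨s, p⟩ := q
    simp only [List.length_cons] at h
    rw [show pvScanB n ((s, p) :: rest) out th = pvScanB n rest (out ++ [p]) (some s) by
      simp only [pvScanB]
      rw [if_neg]
      push_neg
      intro hle
      exfalso; push_cast at h; omega]
    rw [ih (out ++ [p]) (some s) (by simp; push_cast at h ⊢; omega)]
    simp

theorem pvScanB_main (n : Int) (k : Nat) :
    ∀ (L : List (Int × List Int)) (out : List (List Int)) (th : Option Int),
    (out.length : Int) + (k + 1) = n → k + 1 ≤ L.length →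
    pvScanB n L out th = out ++ (L.take (k + 1)).map Prod.snd ++
      ((L.drop (k + 1)).takeWhile (fun q => q.1 == (L.getD k (0, [])).1)).map Prod.snd := by
  induction k with
  | zero =>
    intro L out th hn hlen
    match L with
    | (s, p) :: rest =>
      rw [show pvScanB n ((s, p) :: rest) out th = pvScanB n rest (out ++ [p]) (some s) by
        simp only [pvScanB]; rw [if_neg]; push_neg; intro hle; exfalso; omega]
      rw [pvScanB_tie n rest (out ++ [p]) s (by simp; omega)]
      simp
  | succ k ih =>
    intro L out th hn hlen
    match L with
    | (s, p) :: rest =>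
      rw [show pvScanB n ((s, p) :: rest) out th = pvScanB n rest (out ++ [p]) (some s) by
        simp only [pvScanB]; rw [if_neg]; push_neg; intro hle; exfalso; omega]
      rw [ih rest (out ++ [p]) (some s) (by simp; push_cast at hn ⊢; omega)
        (by simp at hlen; omega)]
      simp

theorem pvTieLoopA_eq (scores : List (Int × List Int)) (t : Int) (k : Nat) :
    ∀ (a : Int) (trimmed : List (List Int)), 0 ≤ a → ((scores.length : Int) - a).toNat = k →
    pvTieLoopA scores t (PySem.List.pyRange a (scores.length : Int)) trimmed =
      trimmed ++ ((scores.drop a.toNat).takeWhile (fun q => q.1 == t)).map Prod.snd := by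
  induction k with
  | zero =>
    intro a trimmed ha hk
    rw [pvRange_nil _ _ (by omega)]
    rw [List.drop_eq_nil_of_le (by omega)]
    simp [pvTieLoopA]
  | succ k ih =>
    intro a trimmed ha hk
    have hlt : a < (scores.length : Int) := by omega
    rw [PySem.List.pyRange_one_cons hlt]
    have hidx : a.toNat < scores.length := by omega
    have hget : PySem.List.pyGetD scores a (0, []) = scores[a.toNat] :=
      PySem.List.pyGetD_eq_getElem scores _ ha hlt
    have hdrop : scores.drop a.toNat = scores[a.toNat] :: scores.drop (a.toNat + 1) :=
      List.drop_eq_getElem_cons hidx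
    by_cases hc : scores[a.toNat].1 = t
    · rw [show pvTieLoopA scores t (a :: PySem.List.pyRange (a + 1) (scores.length : Int)) trimmed =
          pvTieLoopA scores t (PySem.List.pyRange (a + 1) (scores.length : Int))
            (trimmed ++ [scores[a.toNat].2]) by
        simp [pvTieLoopA, hget, hc]]
      rw [ih (a + 1) _ (by omega) (by omega)]
      rw [show (a + 1).toNat = a.toNat + 1 by omega]
      rw [hdrop, List.takeWhile_cons]
      simp [hc]
    · rw [show pvTieLoopA scores t (a :: PySem.List.pyRange (a + 1) (scores.length : Int)) trimmed =
          trimmed by simp [pvTieLoopA, hget, hc]]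
      rw [hdrop, List.takeWhile_cons]
      simp [hc]

theorem pvTake_eq (scores : List (Int × List Int)) (k : Nat) (h : k ≤ scores.length) :
    (PySem.List.pyRange 0 (k : Int)).map (fun i => (PySem.List.pyGetD scores i (0, [])).2) =
      (scores.take k).map Prod.snd := by
  induction k with
  | zero => simp [pvRange_nil]
  | succ k ih =>
    have hk : k < scores.length := by omega
    have hki : ((k : Nat) : Int) < (scores.length : Int) := by exact_mod_cast hk
    rw [show ((k + 1 : Nat) : Int) = (k : Int) + 1 by push_cast; ring]
    rw [PySem.List.pyRange_one_succ_right (Int.natCast_nonneg k)]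
    rw [List.map_append, ih (by omega)]
    rw [List.take_add_one, List.map_append]
    congr 1
    rw [List.getElem?_eq_getElem hk]
    simp [PySem.List.pyGetD_eq_getElem scores (0, []) (Int.natCast_nonneg k) hki]

-- ===== VERDICT (by name: the statement is the Claim_ definition above) =====
theorem trim_leaderboard_spec : Claim_equal_trim_leaderboard := by
  unfold Claim_equal_trim_leaderboard
  intro lb sp n _ hpre
  unfold Spec_trim_leaderboard
  rcases List.eq_nil_or_concat lb with hnil | hne
  · subst hnil
    rfl
  · have hlb : lb ≠ [] := by rcases hne with ⟨_, _, rfl⟩; simp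
    have hn1 : 1 ≤ n := by rcases hpre with h | h; exact absurd h hlb; exact h
    have hmap : lb.map (fun p => (score_peptide p (sp.foldl
        (fun d mass => d.insert mass (d.getD mass 0 + 1)) PySem.Dict.empty), p)) =
        lb.map (fun p => (get_score p sp, p)) := by
      rw [PySem.Dict.foldl_insert_getD_add_one_eq_counter]
      apply List.map_congr_left
      intro p _
      rw [pvScore_eq]
    simp only [trim_leaderboard, trim_leaderboard_alt, hmap, if_neg hlb]
    set L := PySem.List.sorted (lb.map fun p => (get_score p sp, p)) (fun x => x.1) true with hL
    have hlen1 : 1 <= L.length := by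
      rw [hL, List.Perm.length_eq (PySem.List.sorted_perm _ _ _), List.length_map]
      rcases hne with ⟨_, _, rfl⟩; simp
    by_cases hcase : (L.length : Int) <= n
    · rw [if_neg (by omega)]
      rw [min_eq_left hcase]
      rw [show (L.length : Int) = ((L.length : Nat) : Int) from rfl]
      rw [pvTake_eq L L.length le_rfl]
      rw [pvScanB_all n L [] none (by simpa using hcase)]
      simp
    · push_neg at hcase
      have hkn : ((n.toNat : Nat) : Int) = n := by omega
      have hkle : n.toNat <= L.length := by omega
      rw [if_pos (by omega)]
      rw [min_eq_right (le_of_lt hcase), ← hkn]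
      rw [pvTake_eq L n.toNat hkle]
      rw [pvTieLoopA_eq L (PySem.List.pyGetD L ((n.toNat : Int) - 1) (0, [])).1
        (L.length - n.toNat) ((n.toNat : Int)) (List.map Prod.snd (List.take n.toNat L))
        (by positivity) (by omega)]
      rw [show ((n.toNat : Int)).toNat = n.toNat from by omega]
      have hk1 : n.toNat - 1 + 1 = n.toNat := by omega
      rw [pvScanB_main ((n.toNat : Int)) (n.toNat - 1) L [] none
        (by simp; omega) (by omega)]
      rw [hk1]
      have hthr : PySem.List.pyGetD L ((n.toNat : Int) - 1) (0, []) = L.getD (n.toNat - 1) (0, []) := by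
        rw [show ((n.toNat : Int) - 1 : Int) = ((n.toNat - 1 : Nat) : Int) by omega]
        rw [PySem.List.pyGetD_natCast]
      rw [hthr]
      simp
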